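-- pv_equiv track=rewrite | github.com/konstantyg/aoc | 2025/01/solution.py | part1
-- ===== SOURCE A (Python) =====
-- def part1(data: list[int]) -> int:
--     s: int = 50
--     c: int = 0
--     for v in data:
--         s += v
--         s = s % 100
--         if s == 0:
--             c += 1
--     return c
-- ===== SOURCE B (Python) =====
-- def part1(data: list[int]) -> int:
--     # Divide and conquer: hits in a segment = hits in its left half (same start)
--     # plus hits in its right half started at the residue shifted by the left half's sum.
--     def count(seg: list[int], start: int) -> int:
--         if not seg:
--             return 0
--         if len(seg) == 1:
--             return 1 if (start + seg[0]) % 100 == 0 else 0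
--         m = len(seg) // 2
--         left = seg[:m]
--         return count(left, start) + count(seg[m:], (start + sum(left)) % 100)
--     return count(data, 50)
-- ===== Notes on version B (the rewrite author's own statement) =====
-- stated objective: alternative
-- what changed: B replaces A's single fused loop (mod-100 accumulator plus branch-updated counter) by a divide-and-conquer recursion: a segment's hit count is the left half's count plus the right half's count started at the residue shifted by the left half's sum.
import Mathlib
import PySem

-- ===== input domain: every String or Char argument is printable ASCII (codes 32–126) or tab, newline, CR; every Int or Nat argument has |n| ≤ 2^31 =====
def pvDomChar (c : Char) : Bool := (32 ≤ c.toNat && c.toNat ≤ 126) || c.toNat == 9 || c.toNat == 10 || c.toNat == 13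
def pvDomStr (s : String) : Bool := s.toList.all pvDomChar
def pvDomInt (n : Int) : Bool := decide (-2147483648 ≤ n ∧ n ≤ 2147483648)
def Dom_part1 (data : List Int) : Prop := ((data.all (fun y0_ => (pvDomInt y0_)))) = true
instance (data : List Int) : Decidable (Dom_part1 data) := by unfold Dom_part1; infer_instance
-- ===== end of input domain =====

-- B replaces A's fused mod-accumulator loop by a divide-and-conquer recursion over segment halves (objective: alternative).

-- ===== PORT A =====
-- fold state (s, c) mirrors A's running variables
def part1 (data : List Int) : Int :=
  (data.foldl
    (fun (p : Int × Int) v =>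
      let s := PySem.Int.mod (p.1 + v) 100
      (s, if s = 0 then p.2 + 1 else p.2))
    (50, 0)).2

-- ===== PORT B =====
-- Source B's inner 'count': split at the midpoint, recurse on both halves
def pvCount : List Int → Int → Int
  | [], _ => 0
  | [v], start => if PySem.Int.mod (start + v) 100 = 0 then 1 else 0
  | x :: y :: rest, start =>
      let seg := x :: y :: rest
      let m := seg.length / 2
      let left := seg.take m
      pvCount left start + pvCount (seg.drop m) (PySem.Int.mod (start + left.sum) 100)
termination_by seg _ => seg.length
decreasing_by
  · simp only [List.length_take, List.length_cons]
    omega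
  · simp only [List.length_drop, List.length_cons]
    omega

def part1_alt (data : List Int) : Int := pvCount data 50

-- ===== PRECONDITION & SPEC =====
def Spec_part1 (data : List Int) (out : Int) : Prop := out = part1_alt data
instance (data : List Int) (out : Int) : Decidable (Spec_part1 data out) := by unfold Spec_part1; infer_instance

-- ===== CLAIM (what is proved, stated in full; the proofs are below) =====
def Claim_equal_part1 : Prop := ∀ (data : List Int), Dom_part1 data → Spec_part1 data (part1 data)

-- ===== LEMMAS AND PROOFS =====

-- A's loop body, abstracted
def pvStep (p : Int × Int) (v : Int) : Int × Int :=
  let s := PySem.Int.mod (p.1 + v) 100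
  (s, if s = 0 then p.2 + 1 else p.2)

theorem pv_mod_eq (a : Int) : PySem.Int.mod a 100 = a % 100 :=
  PySem.Int.mod_eq_emod_of_pos (by norm_num)

-- the counter component is an accumulator: it splits off additively
theorem pv_snd_shift (l : List Int) : ∀ (s c : Int),
    (l.foldl pvStep (s, c)).2 = c + (l.foldl pvStep (s, 0)).2 := by
  induction l with
  | nil => intro s c; simp
  | cons v r ih =>
    intro s c
    simp only [List.foldl_cons, pvStep]
    by_cases h : PySem.Int.mod (s + v) 100 = 0
    · simp only [if_pos h]
      rw [ih _ (c + 1), ih _ (0 + 1)]; ring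
    · simp only [if_neg h]
      rw [ih _ c]

-- the running state after a nonempty prefix is the residue of start + its sum
theorem pv_fst (l : List Int) (hne : l ≠ []) : ∀ (s c : Int),
    (l.foldl pvStep (s, c)).1 = PySem.Int.mod (s + l.sum) 100 := by
  induction l with
  | nil => exact absurd rfl hne
  | cons v r ih =>
    intro s c
    rcases eq_or_ne r [] with h | h
    · subst h; simp [pvStep]
    · simp only [List.foldl_cons, pvStep]
      rw [ih h, pv_mod_eq, pv_mod_eq, Int.emod_add_emod, List.sum_cons, add_assoc, pv_mod_eq]

-- main invariant: Source B's divide-and-conquer count equals A's loop count from the same start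
theorem pv_count_eq_fold (seg : List Int) (start : Int) :
    pvCount seg start = (seg.foldl pvStep (start, 0)).2 := by
  induction seg, start using pvCount.induct with
  | case1 start => simp [pvCount]
  | case2 v start _ => simp [pvCount, pvStep]
  | case3 v start _ => simp [pvCount, pvStep]
  | case4 x y rest start seg0 m0 left0 ih1 ih2 =>
    rw [pvCount]
    set seg := x :: y :: rest with hseg
    set m := seg.length / 2 with hm
    have hlen : seg.length = rest.length + 2 := by simp [hseg]
    have htne : seg.take m ≠ [] := by
      intro h
      have := congrArg List.length h
      simp only [List.length_take, List.length_nil] at this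
      omega
    have hL : List.foldl pvStep (start, 0) (seg.take m)
        = (PySem.Int.mod (start + (seg.take m).sum) 100,
           (List.foldl pvStep (start, 0) (seg.take m)).2) := by
      refine Prod.ext ?_ rfl
      exact pv_fst (seg.take m) htne start 0
    conv_rhs => rw [← List.take_append_drop m seg, List.foldl_append, hL]
    rw [pv_snd_shift]
    rw [ih1, ih2]

-- ===== VERDICT (by name: the statement is the Claim_ definition above) =====
theorem part1_spec : Claim_equal_part1 := by
  intro data _
  show part1 data = part1_alt data
  unfold part1 part1_alt
  rw [pv_count_eq_fold]
  rfl
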